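-- pv_equiv track=rewrite | github.com/CarlosMaroRuiz/tarea_entropia_SI | services/services.py | calculate_N
-- ===== SOURCE A (Python) =====
-- def calculate_N(password: str) -> int:
--     """
--     Calcula el tamaño del alfabeto (keyspace) N
--
--     El keyspace es la suma de todos los tipos de caracteres únicos posibles
--     que se usaron para construir la contraseña.
--
--     Args:
--         password (str): Contraseña a evaluar
--
--     Returns:
--         int: Tamaño del alfabeto
--     """
--     keyspace = 0
--
--     # Verificar presencia de diferentes tipos de caracteres
--     has_lowercase = any(c.islower() for c in password)
--     has_uppercase = any(c.isupper() for c in password)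
--     has_digits = any(c.isdigit() for c in password)
--     has_symbols = any(not c.isalnum() for c in password)
--
--     # Sumar el tamaño de cada conjunto de caracteres utilizado
--     if has_lowercase:
--         keyspace += 26  # a-z
--     if has_uppercase:
--         keyspace += 26  # A-Z
--     if has_digits:
--         keyspace += 10  # 0-9
--     if has_symbols:
--         keyspace += 32  # Símbolos comunes
--
--     return keyspace if keyspace > 0 else 1
-- ===== SOURCE B (Python) =====
-- def calculate_N(password: str) -> int:
--     # Single pass setting four flags (with early exit), instead of four any() scans.
--     lo = up = dg = sy = False
--     for c in password:
--         if c.islower():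
--             lo = True
--         elif c.isupper():
--             up = True
--         elif c.isdigit():
--             dg = True
--         elif not c.isalnum():
--             sy = True
--         if lo and up and dg and sy:
--             break
--     total = (26 if lo else 0) + (26 if up else 0) + (10 if dg else 0) + (32 if sy else 0)
--     return total if total > 0 else 1
-- ===== Notes on version B (the rewrite author's own statement) =====
-- stated objective: faster
-- what changed: Replaces four independent any() scans of the password with one pass that maintains four boolean flags in a disjoint elif chain and exits early once all four are set.
import Mathlib
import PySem

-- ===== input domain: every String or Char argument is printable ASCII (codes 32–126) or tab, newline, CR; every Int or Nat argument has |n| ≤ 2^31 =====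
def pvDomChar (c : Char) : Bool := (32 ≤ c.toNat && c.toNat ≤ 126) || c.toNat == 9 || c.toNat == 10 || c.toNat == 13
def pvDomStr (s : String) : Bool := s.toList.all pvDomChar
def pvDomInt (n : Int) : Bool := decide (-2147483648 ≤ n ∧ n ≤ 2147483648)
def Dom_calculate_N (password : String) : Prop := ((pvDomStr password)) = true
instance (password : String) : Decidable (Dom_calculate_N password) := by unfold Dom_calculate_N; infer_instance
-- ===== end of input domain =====

-- B replaces A's four independent any() scans with one early-exiting pass maintaining four flags (measured faster in a timing run, constant factor).


-- ===== PORT A =====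
def calculate_N (password : String) : Int :=
  let keyspace : Int := 0
  let has_lowercase := password.toList.any (fun c => PySem.Chars.islower c)
  let has_uppercase := password.toList.any (fun c => PySem.Chars.isupper c)
  let has_digits := password.toList.any (fun c => PySem.Chars.isdigit c)
  let has_symbols := password.toList.any (fun c => !PySem.Chars.isalnum c)
  let keyspace := if has_lowercase then keyspace + 26 else keyspace
  let keyspace := if has_uppercase then keyspace + 26 else keyspace
  let keyspace := if has_digits then keyspace + 10 else keyspace
  let keyspace := if has_symbols then keyspace + 32 else keyspace
  if keyspace > 0 then keyspace else 1

-- ===== PORT B =====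
-- one pass over the characters, four flags, early break once all four are set
def calcNFlags : List Char → Bool → Bool → Bool → Bool → Bool × Bool × Bool × Bool
  | [], lo, up, dg, sy => (lo, up, dg, sy)
  | c :: cs, lo, up, dg, sy =>
    let s :=
      if PySem.Chars.islower c then (true, up, dg, sy)
      else if PySem.Chars.isupper c then (lo, true, dg, sy)
      else if PySem.Chars.isdigit c then (lo, up, true, sy)
      else if !PySem.Chars.isalnum c then (lo, up, dg, true)
      else (lo, up, dg, sy)
    if s.1 && s.2.1 && s.2.2.1 && s.2.2.2 then s
    else calcNFlags cs s.1 s.2.1 s.2.2.1 s.2.2.2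

def calculate_N_alt (password : String) : Int :=
  let f := calcNFlags password.toList false false false false
  let total : Int := (if f.1 then 26 else 0) + (if f.2.1 then 26 else 0)
    + (if f.2.2.1 then 10 else 0) + (if f.2.2.2 then 32 else 0)
  if total > 0 then total else 1

-- ===== PRECONDITION & SPEC =====
def Spec_calculate_N (password : String) (out : Int) : Prop := out = calculate_N_alt password
instance (password : String) (out : Int) : Decidable (Spec_calculate_N password out) := by unfold Spec_calculate_N; infer_instance

-- ===== CLAIM (what is proved, stated in full; the proofs are below) =====
def Claim_equal_calculate_N : Prop := ∀ (password : String), Dom_calculate_N password → Spec_calculate_N password (calculate_N password)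

-- ===== LEMMAS AND PROOFS =====

lemma lower_not_upper (c : Char) (h : PySem.Chars.islower c = true) :
    PySem.Chars.isupper c = false := by
  have h1 : 'a' ≤ c := by
    simp [PySem.Chars.islower] at h; exact h.1
  have h2 : ¬ c ≤ 'Z' := fun hz => absurd (le_trans h1 hz) (by decide)
  unfold PySem.Chars.isupper
  rw [decide_eq_false h2, Bool.and_false]

lemma lower_not_digit (c : Char) (h : PySem.Chars.islower c = true) :
    PySem.Chars.isdigit c = false := by
  have h1 : 'a' ≤ c := by
    simp [PySem.Chars.islower] at h; exact h.1
  have h2 : ¬ c ≤ '9' := fun hz => absurd (le_trans h1 hz) (by decide)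
  unfold PySem.Chars.isdigit
  rw [decide_eq_false h2, Bool.and_false]

lemma upper_not_digit (c : Char) (h : PySem.Chars.isupper c = true) :
    PySem.Chars.isdigit c = false := by
  have h1 : 'A' ≤ c := by
    simp [PySem.Chars.isupper] at h; exact h.1
  have h2 : ¬ c ≤ '9' := fun hz => absurd (le_trans h1 hz) (by decide)
  unfold PySem.Chars.isdigit
  rw [decide_eq_false h2, Bool.and_false]

lemma calcNFlags_eq (cs : List Char) (lo up dg sy : Bool) :
    calcNFlags cs lo up dg sy =
      (lo || cs.any PySem.Chars.islower, up || cs.any PySem.Chars.isupper,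
       dg || cs.any PySem.Chars.isdigit, sy || cs.any (fun c => !PySem.Chars.isalnum c)) := by
  induction cs generalizing lo up dg sy with
  | nil => simp [calcNFlags]
  | cons c cs ih =>
    simp only [calcNFlags, List.any_cons]
    by_cases hl : PySem.Chars.islower c = true
    · have hu := lower_not_upper c hl
      have hd := lower_not_digit c hl
      have ha : (!PySem.Chars.isalnum c) = false := by
        simp [PySem.Chars.isalnum, PySem.Chars.isalpha, hl]
      rw [if_pos hl]
      split
      · rename_i h
        simp only [Bool.and_eq_true, true_and, and_true] at h
        obtain ⟨⟨hup, hdg⟩, hsy⟩ := h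
        subst hup; subst hdg; subst hsy
        simp [hl]
      · rw [ih]
        simp [hl, hu, hd, ha, Bool.or_assoc]
    · by_cases hu : PySem.Chars.isupper c = true
      · have hd := upper_not_digit c hu
        have ha : (!PySem.Chars.isalnum c) = false := by
          simp [PySem.Chars.isalnum, PySem.Chars.isalpha, hu]
        rw [if_neg hl, if_pos hu]
        split
        · rename_i h
          simp only [Bool.and_eq_true, true_and, and_true] at h
          obtain ⟨⟨hlo, hdg⟩, hsy⟩ := h
          subst hlo; subst hdg; subst hsy
          simp [hu]
        · rw [ih]
          simp [hl, hu, hd, ha, Bool.or_assoc]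
      · by_cases hd : PySem.Chars.isdigit c = true
        · have ha : (!PySem.Chars.isalnum c) = false := by
            simp [PySem.Chars.isalnum, hd]
          rw [if_neg hl, if_neg hu, if_pos hd]
          split
          · rename_i h
            simp only [Bool.and_eq_true, true_and, and_true] at h
            obtain ⟨⟨hlo, hup⟩, hsy⟩ := h
            subst hlo; subst hup; subst hsy
            simp [hd]
          · rw [ih]
            simp [hl, hu, hd, ha, Bool.or_assoc]
        · have ha : (!PySem.Chars.isalnum c) = true := by
            simp [PySem.Chars.isalnum, PySem.Chars.isalpha, hl, hu, hd]
          rw [if_neg hl, if_neg hu, if_neg hd, if_pos ha]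
          split
          · rename_i h
            simp only [Bool.and_eq_true, true_and, and_true] at h
            obtain ⟨⟨hlo, hup⟩, hdg⟩ := h
            subst hlo; subst hup; subst hdg
            simp [ha]
          · rw [ih]
            simp [hl, hu, hd, ha, Bool.or_assoc]

-- ===== VERDICT (by name: the statement is the Claim_ definition above) =====
theorem calculate_N_spec : Claim_equal_calculate_N := by
  intro password _
  unfold Spec_calculate_N calculate_N calculate_N_alt
  rw [calcNFlags_eq]
  simp only [Bool.false_or]
  cases password.toList.any PySem.Chars.islower <;>
    cases password.toList.any PySem.Chars.isupper <;>
    cases password.toList.any PySem.Chars.isdigit <;>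
    cases password.toList.any (fun c => !PySem.Chars.isalnum c) <;> norm_num
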